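-- pv_equiv track=rewrite | github.com/ryzzaki/ECS640-Coursework | scripts/part_c.py | combiner_block_aggregate
-- ===== SOURCE A (Python) =====
-- def combiner_block_aggregate(block_num, values):
--     try:
--         values = [x for x in values]
--         data_types = {}
--         for list in values:
--             key = list[0]
--             vals = list[1]
--             if key in data_types:
--                 data_types[key] = [sum(v)
--                                    for v in zip(data_types[key], vals)]
--             else:
--                 data_types[key] = vals
--         for data_type in data_types.items():
--             yield(block_num, data_type)
--     except:
--         pass
-- ===== SOURCE B (Python) =====
-- def combiner_block_aggregate(block_num, values):
--     # Same generator contract as A; return-value equivalence only (both are generators).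
--     try:
--         values = [x for x in values]
--         groups = {}
--         for key, vals in values:
--             if key in groups:
--                 groups[key].append(vals)
--             else:
--                 groups[key] = [vals]
--         for key, group in groups.items():
--             if len(group) == 1:
--                 yield (block_num, (key, group[0]))
--             else:
--                 yield (block_num, (key, [sum(col) for col in zip(*group)]))
--     except:
--         pass
-- ===== Notes on version B (the rewrite author's own statement) =====
-- stated objective: alternative
-- what changed: A folds each key's running elementwise zip-sum incrementally during the single scan; B first groups all vectors per key (append-only pass) and then aggregates each multi-vector group in one shot with [sum(col) for col in zip(*group)], yielding singleton groups' vector unchanged.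
import Mathlib
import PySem

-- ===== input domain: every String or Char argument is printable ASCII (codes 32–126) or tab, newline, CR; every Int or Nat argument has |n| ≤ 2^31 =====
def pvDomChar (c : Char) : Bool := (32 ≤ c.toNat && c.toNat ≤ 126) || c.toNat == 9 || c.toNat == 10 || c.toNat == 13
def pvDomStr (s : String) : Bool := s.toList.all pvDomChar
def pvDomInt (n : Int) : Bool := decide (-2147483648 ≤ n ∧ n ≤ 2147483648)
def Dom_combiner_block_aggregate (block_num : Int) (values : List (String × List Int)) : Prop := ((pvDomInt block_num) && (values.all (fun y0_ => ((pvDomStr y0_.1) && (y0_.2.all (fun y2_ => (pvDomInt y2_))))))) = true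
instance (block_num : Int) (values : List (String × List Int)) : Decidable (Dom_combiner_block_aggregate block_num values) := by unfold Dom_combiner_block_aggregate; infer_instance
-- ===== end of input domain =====

-- B groups vectors per key first and then aggregates each group in one shot; A keeps a running
-- elementwise sum per key.  Return-value equivalence of the two generators' yielded lists.

-- ===== PORT A =====
-- [sum(v) for v in zip(acc, vals)] : pairwise zip then sum of each 2-tuple
def pvZsum (a b : List Int) : List Int := (a.zip b).map (fun q => q.1 + q.2)

def pvStepA (d : PySem.Dict String (List Int)) (p : String × List Int) : PySem.Dict String (List Int) :=
  if d.contains p.1 then d.insert p.1 (pvZsum (d.getD p.1 []) p.2)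
  else d.insert p.1 p.2

def combiner_block_aggregate (block_num : Int) (values : List (String × List Int)) : List (Int × (String × List Int)) :=
  let data_types := values.foldl pvStepA PySem.Dict.empty
  data_types.items.map (fun data_type => (block_num, data_type))

-- ===== PORT B =====
-- min over the group's lengths = the truncation zip(*group) performs
def pvMinLen (g : List (List Int)) : Nat :=
  match g with
  | [] => 0
  | a :: t => t.foldl (fun m v => min m v.length) a.length

-- [sum(col) for col in zip(*group)]
def pvColSum (g : List (List Int)) : List Int :=
  (List.range (pvMinLen g)).map (fun i => (g.map (fun v => v.getD i 0)).sum)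

def pvStepB (d : PySem.Dict String (List (List Int))) (p : String × List Int) : PySem.Dict String (List (List Int)) :=
  if d.contains p.1 then d.modify p.1 [] (fun g => g ++ [p.2])
  else d.insert p.1 [p.2]

def combiner_block_aggregate_alt (block_num : Int) (values : List (String × List Int)) : List (Int × (String × List Int)) :=
  let groups := values.foldl pvStepB PySem.Dict.empty
  groups.items.map (fun p =>
    if p.2.length == 1 then (block_num, (p.1, p.2.headD []))
    else (block_num, (p.1, pvColSum p.2)))

-- ===== PRECONDITION & SPEC =====
def Spec_combiner_block_aggregate (block_num : Int) (values : List (String × List Int)) (out : List (Int × (String × List Int))) : Prop := out = combiner_block_aggregate_alt block_num values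
instance (block_num : Int) (values : List (String × List Int)) (out : List (Int × (String × List Int))) : Decidable (Spec_combiner_block_aggregate block_num values out) := by unfold Spec_combiner_block_aggregate; infer_instance

-- ===== CLAIM (what is proved, stated in full; the proofs are below) =====
def Claim_equal_combiner_block_aggregate : Prop := ∀ (block_num : Int) (values : List (String × List Int)), Dom_combiner_block_aggregate block_num values → Spec_combiner_block_aggregate block_num values (combiner_block_aggregate block_num values)

-- ===== LEMMAS AND PROOFS =====

-- A's incremental aggregation of a group
def pvAggA (a : List Int) (g : List (List Int)) : List Int := g.foldl pvZsum a

theorem pvStepA_eq : pvStepA = fun d p => d.insert p.1 (if d.contains p.1 then pvZsum (d.getD p.1 []) p.2 else p.2) := by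
  funext d p
  unfold pvStepA
  split <;> simp_all

theorem pvStepB_eq : pvStepB = fun d p => d.modify p.1 [] (fun g => g ++ [p.2]) := by
  funext d p
  unfold pvStepB
  split <;> simp_all [PySem.Dict.modify, PySem.Dict.getD_of_not_contains]

theorem pvNodupA (l : List (String × List Int)) :
    (l.foldl pvStepA PySem.Dict.empty).keys.Nodup := by
  rw [pvStepA_eq]
  exact PySem.Dict.nodup_keys_foldl_insert_key l (·.1) _ _ PySem.Dict.nodup_keys_empty

theorem pvNodupB (l : List (String × List Int)) :
    (l.foldl pvStepB PySem.Dict.empty).keys.Nodup := by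
  rw [pvStepB_eq]
  exact PySem.Dict.nodup_keys_foldl_modify_key l (·.1) _ _ _ PySem.Dict.nodup_keys_empty

theorem pvKeysA (l : List (String × List Int)) :
    (l.foldl pvStepA PySem.Dict.empty).keys = PySem.Set.ofList (l.map (·.1)) := by
  rw [pvStepA_eq, PySem.Dict.keys_foldl_insert_key]
  simp [PySem.Set.update_nil_left]

theorem pvKeysB (l : List (String × List Int)) :
    (l.foldl pvStepB PySem.Dict.empty).keys = PySem.Set.ofList (l.map (·.1)) := by
  rw [pvStepB_eq, PySem.Dict.keys_foldl_modify_key]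
  simp [PySem.Set.update_nil_left]

theorem pvGetDB (l : List (String × List Int)) (c : String) :
    (l.foldl pvStepB PySem.Dict.empty).getD c [] = (l.filter (fun p => p.1 == c)).map (·.2) := by
  rw [pvStepB_eq]
  simp [PySem.Dict.getD_foldl_modify_append]

theorem pvGetA (l : List (String × List Int)) (d : PySem.Dict String (List Int)) (c : String)
    (hnd : d.keys.Nodup) :
    (l.foldl pvStepA d).get? c =
      match d.get? c with
      | some a => some (pvAggA a ((l.filter (fun p => p.1 == c)).map (·.2)))
      | none =>
        match (l.filter (fun p => p.1 == c)).map (·.2) with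
        | [] => none
        | a :: g => some (pvAggA a g) := by
  induction l generalizing d with
  | nil => cases h : d.get? c <;> simp [pvAggA, h]
  | cons p l ih =>
    have hnd' : (pvStepA d p).keys.Nodup := by
      rw [pvStepA_eq]
      exact PySem.Dict.nodup_keys_insert _ _ _ hnd
    rw [List.foldl_cons, ih _ hnd']
    by_cases hpc : p.1 = c
    · subst hpc
      rw [pvStepA_eq]
      cases h : d.get? p.1 with
      | some a =>
        have hc : d.contains p.1 = true := by
          rw [PySem.Dict.contains_eq_isSome_get?, h]; rfl
        have hgd : d.getD p.1 [] = a := PySem.Dict.getD_of_get?_eq_some _ _ h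
        simp [hc, hgd, PySem.Dict.get?_insert_self, pvAggA]
      | none =>
        have hc : d.contains p.1 = false := by
          rw [PySem.Dict.contains_eq_isSome_get?, h]; rfl
        simp [hc, PySem.Dict.get?_insert_self, pvAggA]
    · have h1 : (pvStepA d p).get? c = d.get? c := by
        rw [pvStepA_eq]
        exact PySem.Dict.get?_insert_of_ne _ _ (Ne.symm hpc)
      have h2 : (p.1 == c) = false := by simp [hpc]
      simp [h1, h2]

-- ===== the math: incremental zip-sum = column sums over the min length =====

theorem pvFoldlMinLe (t : List (List Int)) (m : Nat) :
    t.foldl (fun m v => min m v.length) m ≤ m := by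
  induction t generalizing m with
  | nil => simp
  | cons b t ih => exact le_trans (ih _) (Nat.min_le_left _ _)

theorem pvReconstruct (a : List Int) :
    (List.range a.length).map (fun i => a.getD i 0) = a := by
  apply List.ext_getElem
  · simp
  · intro i h1 h2
    simp only [List.getElem_map, List.getElem_range, List.getD_eq_getElem?_getD]
    rw [List.getElem?_eq_getElem (by simpa using h1)]
    rfl

theorem pvLenZsum (a b : List Int) : (pvZsum a b).length = min a.length b.length := by
  simp [pvZsum]

theorem pvGetDZsum (a b : List Int) (i : Nat) (h : i < min a.length b.length) :
    (pvZsum a b).getD i 0 = a.getD i 0 + b.getD i 0 := by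
  have ha : i < a.length := lt_of_lt_of_le h (Nat.min_le_left _ _)
  have hb : i < b.length := lt_of_lt_of_le h (Nat.min_le_right _ _)
  have hz : i < (pvZsum a b).length := by rw [pvLenZsum]; exact h
  simp [List.getD_eq_getElem?_getD, ha, hb, pvZsum]

theorem pvAggA_colSum (t : List (List Int)) (a : List Int) :
    pvAggA a t = pvColSum (a :: t) := by
  induction t generalizing a with
  | nil =>
    simp only [pvAggA, List.foldl_nil, pvColSum, pvMinLen, List.map_cons, List.map_nil,
      List.sum_cons, List.sum_nil, add_zero]
    exact (pvReconstruct a).symm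
  | cons b t ih =>
    have hstep : pvAggA a (b :: t) = pvAggA (pvZsum a b) t := rfl
    rw [hstep, ih]
    have hmin : pvMinLen (pvZsum a b :: t) = pvMinLen (a :: b :: t) := by
      simp [pvMinLen, pvLenZsum, List.foldl_cons]
    unfold pvColSum
    rw [hmin]
    apply List.map_congr_left
    intro i hi
    have hilt : i < pvMinLen (a :: b :: t) := List.mem_range.mp hi
    have hle : pvMinLen (a :: b :: t) ≤ min a.length b.length := by
      simpa [pvMinLen, List.foldl_cons] using pvFoldlMinLe t (min a.length b.length)
    have : (pvZsum a b).getD i 0 = a.getD i 0 + b.getD i 0 :=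
      pvGetDZsum a b i (lt_of_lt_of_le hilt hle)
    simp only [List.map_cons, List.sum_cons, this, add_assoc]

-- ===== VERDICT (by name: the statement is the Claim_ definition above) =====
theorem combiner_block_aggregate_spec : Claim_equal_combiner_block_aggregate := by
  intro block_num values _
  show combiner_block_aggregate block_num values = combiner_block_aggregate_alt block_num values
  unfold combiner_block_aggregate combiner_block_aggregate_alt
  dsimp only
  rw [PySem.Dict.items_eq_map_keys _ (pvNodupA values) [],
      PySem.Dict.items_eq_map_keys _ (pvNodupB values) [],
      pvKeysA, pvKeysB, List.map_map, List.map_map]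
  apply List.map_congr_left
  intro k hk
  have hkmem : k ∈ values.map (·.1) := (PySem.Set.mem_ofList _ _).mp hk
  have hgB := pvGetDB values k
  -- the group is nonempty because k occurs among the keys
  obtain ⟨p, hp, hpk⟩ := List.mem_map.mp hkmem
  have hne : (values.filter (fun p => p.1 == k)).map (·.2) ≠ [] := by
    have : p ∈ values.filter (fun p => p.1 == k) := by
      rw [List.mem_filter]; exact ⟨hp, by simp [hpk]⟩
    intro hnil
    simp only [List.map_eq_nil_iff] at hnil
    rw [hnil] at this
    exact (List.not_mem_nil) this
  obtain ⟨a, t, hat⟩ := List.exists_cons_of_ne_nil hne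
  have hA : (values.foldl pvStepA PySem.Dict.empty).getD k [] = pvAggA a t := by
    rw [PySem.Dict.getD_eq_get?_getD, pvGetA values _ k PySem.Dict.nodup_keys_empty]
    simp [PySem.Dict.get?_empty, hat]
  simp only [Function.comp, hA, hgB, hat]
  cases t with
  | nil => simp [pvAggA]
  | cons b t => rw [pvAggA_colSum]; simp
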